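-- pv_equiv track=rewrite | github.com/greg-czaplicki/polybot | control-agent.py | serialize_env_value
-- ===== SOURCE A (Python) =====
-- def serialize_env_value(value: str) -> str:
-- 	if value == "":
-- 		return '""'
-- 	needs_quotes = any(ch.isspace() for ch in value) or "#" in value or "=" in value
-- 	if not needs_quotes:
-- 		return value
-- 	escaped = value.replace("\\", "\\\\").replace('"', '\\"')
-- 	return f'"{escaped}"'
-- ===== SOURCE B (Python) =====
-- def serialize_env_value(value: str) -> str:
--     if value == "":
--         return '""'
--     buf = []
--     needs_quotes = False
--     for ch in value:
--         if ch == "\\":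
--             buf.append("\\\\")
--         elif ch == '"':
--             buf.append('\\"')
--         else:
--             buf.append(ch)
--         if ch.isspace() or ch == "#" or ch == "=":
--             needs_quotes = True
--     if not needs_quotes:
--         return value
--     return '"' + "".join(buf) + '"'
-- ===== Notes on version B (the rewrite author's own statement) =====
-- stated objective: alternative
-- what changed: Fuses A's any()-predicate scan, the two replace() passes and the membership tests into one single char-by-char loop that builds the escaped buffer and the needs_quotes flag together.
import Mathlib
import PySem

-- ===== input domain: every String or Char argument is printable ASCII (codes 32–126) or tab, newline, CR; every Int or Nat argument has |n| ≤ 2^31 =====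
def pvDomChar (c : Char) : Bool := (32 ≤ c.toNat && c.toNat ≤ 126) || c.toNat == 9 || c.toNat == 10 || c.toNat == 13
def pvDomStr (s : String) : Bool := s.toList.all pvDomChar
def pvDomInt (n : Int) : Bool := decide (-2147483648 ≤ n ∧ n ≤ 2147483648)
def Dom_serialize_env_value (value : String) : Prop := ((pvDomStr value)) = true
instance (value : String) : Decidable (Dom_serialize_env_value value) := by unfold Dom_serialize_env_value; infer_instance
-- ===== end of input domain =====

-- B fuses A's predicate scan and two replace passes into one loop; return value only, proved equal on all inputs.

-- ===== PORT A =====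
def serialize_env_value (value : String) : String :=
  if value = "" then "\"\""
  else
    let cs := value.toList
    let needs_quotes :=
      cs.any PySem.Chars.isspace || PySem.Chars.isIn ['#'] cs || PySem.Chars.isIn ['='] cs
    if !needs_quotes then value
    else
      let escaped :=
        PySem.Chars.replace (PySem.Chars.replace cs ['\\'] ['\\', '\\']) ['"'] ['\\', '"']
      String.ofList ('"' :: escaped ++ ['"'])

-- ===== PORT B =====
-- one loop: extend the buffer with the (possibly escaped) char and update the flag
def escStep (st : List Char × Bool) (c : Char) : List Char × Bool :=
  let buf :=
    if c = '\\' then st.1 ++ ['\\', '\\']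
    else if c = '"' then st.1 ++ ['\\', '"']
    else st.1 ++ [c]
  (buf, st.2 || (PySem.Chars.isspace c || c = '#' || c = '='))

def serialize_env_value_alt (value : String) : String :=
  if value = "" then "\"\""
  else
    let st := value.toList.foldl escStep ([], false)
    if !st.2 then value
    else String.ofList ('"' :: st.1 ++ ['"'])

-- ===== PRECONDITION & SPEC =====
def Spec_serialize_env_value (value : String) (out : String) : Prop := out = serialize_env_value_alt value
instance (value : String) (out : String) : Decidable (Spec_serialize_env_value value out) := by unfold Spec_serialize_env_value; infer_instance

-- ===== CLAIM (what is proved, stated in full; the proofs are below) =====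
def Claim_equal_serialize_env_value : Prop := ∀ (value : String), Dom_serialize_env_value value → Spec_serialize_env_value value (serialize_env_value value)

-- ===== LEMMAS AND PROOFS =====

def pvEsc (c : Char) : List Char :=
  if c = '\\' then ['\\', '\\'] else if c = '"' then ['\\', '"'] else [c]

def pvNeedsQ (c : Char) : Bool := PySem.Chars.isspace c || c = '#' || c = '='

theorem replace_go_single (o : Char) (new : List Char) :
    ∀ (l acc : List Char) (fuel : Nat), l.length ≤ fuel →
      PySem.Chars.replace.go [o] new fuel l acc
        = acc.reverse ++ l.flatMap (fun c => if c = o then new else [c]) := by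
  intro l
  induction l with
  | nil =>
    intro acc fuel _
    cases fuel <;> simp [PySem.Chars.replace.go]
  | cons c t ih =>
    intro acc fuel hf
    cases fuel with
    | zero => simp at hf
    | succ n =>
      have ht : t.length ≤ n := by simpa using hf
      by_cases hco : c = o
      · subst hco
        simp [PySem.Chars.replace.go, List.isPrefixOf, ih _ _ ht]
      · have : ([o].isPrefixOf (c :: t)) = false := by
          simp [List.isPrefixOf]
          exact fun h => (hco h.symm).elim
        simp [PySem.Chars.replace.go, this, ih _ _ ht, hco]

theorem replace_single (o : Char) (new : List Char) (cs : List Char) :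
    PySem.Chars.replace cs [o] new = cs.flatMap (fun c => if c = o then new else [c]) := by
  simp [PySem.Chars.replace]
  exact replace_go_single o new cs [] cs.length le_rfl

theorem isIn_single (o : Char) (cs : List Char) :
    PySem.Chars.isIn [o] cs = cs.contains o := by
  by_cases h : o ∈ cs
  · have : [o] <:+: cs := by
      obtain ⟨l1, l2, rfl⟩ := List.append_of_mem h
      exact ⟨l1, l2, by simp⟩
    simp [(PySem.Chars.isIn_iff_infix _ _).mpr this, h]
  · have : ¬ ([o] <:+: cs) := by
      intro hi
      exact h (hi.subset (by simp))
    simp [(PySem.Chars.isIn_eq_false_iff _ _).mpr this, h]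

theorem foldl_escStep (cs : List Char) :
    ∀ (acc : List Char) (b : Bool),
      cs.foldl escStep (acc, b) = (acc ++ cs.flatMap pvEsc, b || cs.any pvNeedsQ) := by
  induction cs with
  | nil => intro acc b; simp
  | cons c t ih =>
    intro acc b
    simp only [List.foldl_cons, List.flatMap_cons, List.any_cons]
    rw [show escStep (acc, b) c = (acc ++ pvEsc c, b || pvNeedsQ c) by
      simp only [escStep, pvEsc, pvNeedsQ]; split_ifs <;> rfl]
    rw [ih]
    simp [Bool.or_assoc]

theorem needsq_eq (cs : List Char) :
    (cs.any PySem.Chars.isspace || PySem.Chars.isIn ['#'] cs || PySem.Chars.isIn ['='] cs)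
      = cs.any pvNeedsQ := by
  rw [isIn_single, isIn_single]
  induction cs with
  | nil => simp
  | cons c t ih =>
    simp only [List.any_cons, List.contains_cons] at *
    rw [← ih]
    simp [pvNeedsQ]
    have e1 : ('#' == c) = decide (c = '#') := by
      by_cases h : c = '#'
      · simp [h]
      · rw [decide_eq_false h]; exact beq_eq_false_iff_ne.mpr (Ne.symm h)
    have e2 : ('=' == c) = decide (c = '=') := by
      by_cases h : c = '='
      · simp [h]
      · rw [decide_eq_false h]; exact beq_eq_false_iff_ne.mpr (Ne.symm h)
    rw [e1, e2]
    cases PySem.Chars.isspace c <;> by_cases h1 : c = '#' <;> by_cases h2 : c = '=' <;>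
      simp [h1, h2, Bool.or_comm, Bool.or_assoc]


theorem escaped_eq (cs : List Char) :
    PySem.Chars.replace (PySem.Chars.replace cs ['\\'] ['\\', '\\']) ['"'] ['\\', '"']
      = cs.flatMap pvEsc := by
  rw [replace_single, replace_single, List.flatMap_assoc]
  apply List.flatMap_congr
  intro c _
  by_cases h1 : c = '\\' <;> by_cases h2 : c = '"' <;> simp_all [pvEsc]

-- ===== VERDICT (by name: the statement is the Claim_ definition above) =====
theorem serialize_env_value_spec : Claim_equal_serialize_env_value := by
  intro value _
  unfold Spec_serialize_env_value serialize_env_value serialize_env_value_alt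
  by_cases hv : value = ""
  · simp [hv]
  · simp only [hv, if_false]
    rw [foldl_escStep, needsq_eq, escaped_eq]
    simp
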